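-- pv_equiv track=rewrite | github.com/spencermwoo/Cracking | KeePass/generate.py | get_alphabet_string
-- ===== SOURCE A (Python) =====
-- def get_alphabet_string(alphabet, num):
-- 	alpha_len = len(alphabet)
--
-- 	index = num % alpha_len
-- 	num = (int)(num / alpha_len)
-- 	if(num > 0):
-- 		return alphabet[index] + get_alphabet_string(alphabet, num)
-- 	else:
-- 		return alphabet[index]
-- ===== SOURCE B (Python) =====
-- def get_alphabet_string(alphabet, num):
--     alpha_len = len(alphabet)
--     out = []
--     while True:
--         out.append(alphabet[num % alpha_len])
--         num = int(num / alpha_len)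
--         if num <= 0:
--             break
--     return ''.join(out)
-- ===== Notes on version B (the rewrite author's own statement) =====
-- stated objective: idiomatic
-- what changed: Replaced the recursion (which rebuilds the tail string at every level) by a single do-while loop that appends each extracted digit to a list and joins once at the end.
-- outside the precondition, e.g. on get_alphabet_string('', 3): A raises ZeroDivisionError, B raises ZeroDivisionError
import Mathlib
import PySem

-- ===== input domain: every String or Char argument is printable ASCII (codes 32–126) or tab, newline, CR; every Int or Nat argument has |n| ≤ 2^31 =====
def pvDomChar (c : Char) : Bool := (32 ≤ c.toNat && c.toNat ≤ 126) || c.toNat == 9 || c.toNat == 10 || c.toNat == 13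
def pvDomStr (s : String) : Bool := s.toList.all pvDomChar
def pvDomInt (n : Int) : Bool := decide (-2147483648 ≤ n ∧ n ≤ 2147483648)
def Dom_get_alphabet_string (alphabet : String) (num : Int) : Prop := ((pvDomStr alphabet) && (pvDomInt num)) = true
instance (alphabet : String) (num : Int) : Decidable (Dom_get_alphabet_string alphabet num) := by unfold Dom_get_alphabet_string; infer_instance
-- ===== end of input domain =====

-- B replaces A's recursion (retail string concatenation at every level) by one do-while loop
-- appending digits to a list and joining once; return values proved equal on Pre_.

-- ===== PORT A =====
-- A's recursion, fuel-guarded only to make it total in Lean (inside Pre_ the fuel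
-- num.toNat + 1 is never exhausted, since the recursive argument strictly decreases).
def pvGoA (s : List Char) (fuel : Nat) (num : Int) : List Char :=
  match fuel with
  | 0 => []
  | f + 1 =>
    let alpha_len : Int := s.length
    let index := PySem.Int.mod num alpha_len
    let num' := PySem.Int.truncdiv num alpha_len   -- int(num / alpha_len)
    let c := (PySem.List.pyGet? s index).getD ' '  -- alphabet[index]; in range whenever alpha_len > 0
    if num' > 0 then c :: pvGoA s f num' else [c]

def get_alphabet_string (alphabet : String) (num : Int) : String :=
  String.mk (pvGoA alphabet.toList (num.toNat + 1) num)

-- ===== PORT B =====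
-- Source B's while-True loop: append a digit, divide, break when quotient ≤ 0; join at the end.
def pvGoB (s : List Char) (fuel : Nat) (num : Int) (acc : List Char) : List Char :=
  match fuel with
  | 0 => acc
  | f + 1 =>
    let acc' := acc ++ [(PySem.List.pyGet? s (PySem.Int.mod num s.length)).getD ' ']
    let num' := PySem.Int.truncdiv num s.length
    if num' ≤ 0 then acc' else pvGoB s f num' acc'

def get_alphabet_string_alt (alphabet : String) (num : Int) : String :=
  String.mk (pvGoB alphabet.toList (num.toNat + 1) num [])

-- ===== PRECONDITION & SPEC =====
-- Pre_ excludes the empty alphabet (A raises ZeroDivisionError) and a one-character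
-- alphabet with num > 0 (A recurses forever, RecursionError); A returns everywhere else.
def Pre_get_alphabet_string (alphabet : String) (num : Int) : Prop :=
  1 ≤ alphabet.toList.length ∧ (2 ≤ alphabet.toList.length ∨ num ≤ 0)
instance (alphabet : String) (num : Int) : Decidable (Pre_get_alphabet_string alphabet num) := by
  unfold Pre_get_alphabet_string; infer_instance

def pvWitness_get_alphabet_string : String × Int := ("ab", 5)

def Spec_get_alphabet_string (alphabet : String) (num : Int) (out : String) : Prop :=
  out = get_alphabet_string_alt alphabet num
instance (alphabet : String) (num : Int) (out : String) : Decidable (Spec_get_alphabet_string alphabet num out) := by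
  unfold Spec_get_alphabet_string; infer_instance

-- ===== CLAIM (what is proved, stated in full; the proofs are below) =====
def Claim_equal_get_alphabet_string : Prop := ∀ (alphabet : String) (num : Int), Dom_get_alphabet_string alphabet num → Pre_get_alphabet_string alphabet num → Spec_get_alphabet_string alphabet num (get_alphabet_string alphabet num)

-- ===== LEMMAS AND PROOFS =====
-- Loop invariant: with equal fuel, B's accumulator loop produces acc ++ (A's recursion).
theorem pvGoB_eq_acc_append (s : List Char) (fuel : Nat) :
    ∀ (num : Int) (acc : List Char), pvGoB s fuel num acc = acc ++ pvGoA s fuel num := by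
  induction fuel with
  | zero => intro num acc; simp [pvGoA, pvGoB]
  | succ f ih =>
    intro num acc
    simp only [pvGoA, pvGoB]
    by_cases h : PySem.Int.truncdiv num (s.length : Int) ≤ 0
    · simp [h, not_lt.mpr h]
    · simp [h, lt_of_not_ge h, ih]

-- ===== VERDICT (by name: the statement is the Claim_ definition above) =====
theorem get_alphabet_string_spec : Claim_equal_get_alphabet_string := by
  intro alphabet num _ _
  unfold Spec_get_alphabet_string get_alphabet_string get_alphabet_string_alt
  rw [pvGoB_eq_acc_append]
  simp
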